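-- pv_equiv track=rewrite | github.com/susami-jpg/atcoder_probrem | 分割統治法によるソート.py | modify_order
-- ===== SOURCE A (Python) =====
-- def modify_order(A):
--     if len(A) < 2:
--         return A
--     *B, hip, tail = A #リストAをhip, tailとそれ以外に分割
--     if tail < hip:
--         return modify_order(B + [tail]) + [hip]
--     else:
--         return modify_order(B + [hip]) + [tail]
-- ===== SOURCE B (Python) =====
-- def modify_order(A):
--     # One O(n) pass: suffix minima, then out[0] = suf[0], out[i] = max(A[i-1], suf[i]).
--     if len(A) < 2:
--         return A
--     suf = A[:]
--     for i in range(len(A) - 2, -1, -1):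
--         suf[i] = min(A[i], suf[i + 1])
--     return [suf[0]] + [max(x, s) for x, s in zip(A, suf[1:])]
-- ===== Notes on version B (the rewrite author's own statement) =====
-- stated objective: faster
-- what changed: Replaces A's quadratic recursion (repeatedly rebuilding the list while bubbling the larger of the last two elements to the end) with a single right-to-left suffix-minima pass plus one zip: the first output is the overall minimum, and each later output is the maximum of the preceding input element and the suffix minimum at that position.
import Mathlib
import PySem

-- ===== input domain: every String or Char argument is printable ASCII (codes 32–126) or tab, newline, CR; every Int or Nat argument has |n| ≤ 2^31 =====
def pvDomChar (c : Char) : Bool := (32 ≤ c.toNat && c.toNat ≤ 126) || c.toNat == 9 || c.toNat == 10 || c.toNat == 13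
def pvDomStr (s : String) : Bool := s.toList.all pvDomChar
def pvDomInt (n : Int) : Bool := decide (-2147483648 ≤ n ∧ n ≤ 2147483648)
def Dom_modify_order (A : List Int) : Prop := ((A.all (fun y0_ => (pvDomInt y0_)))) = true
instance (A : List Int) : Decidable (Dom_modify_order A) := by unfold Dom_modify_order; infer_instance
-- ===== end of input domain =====

-- B replaces A's quadratic recursion by a single suffix-minima pass (objective: faster; measured).

-- ===== PORT A =====
-- '*B, hip, tail = A' is ported by matching on A.reverse (Brev = B reversed).
def modify_order (A : List Int) : List Int :=
  if A.length < 2 then A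
  else
    match h : A.reverse with
    | tail :: hip :: Brev =>
      if tail < hip then modify_order (Brev.reverse ++ [tail]) ++ [hip]
      else modify_order (Brev.reverse ++ [hip]) ++ [tail]
    | _ => A
termination_by A.length
decreasing_by
  · have hl := congrArg List.length h
    simp at hl
    simp [hl]
  · have hl := congrArg List.length h
    simp at hl
    simp [hl]

-- ===== PORT B =====
-- suffix-minima list, built right-to-left as in Source B's loop
def pvSufmin : List Int → List Int
  | [] => []
  | x :: rest =>
    match pvSufmin rest with
    | [] => [x]
    | s0 :: st => min x s0 :: s0 :: st

def modify_order_alt (A : List Int) : List Int :=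
  if A.length < 2 then A
  else
    match pvSufmin A with
    | [] => []
    | s0 :: st => s0 :: List.zipWith max A st  -- zip(A, suf[1:]) truncates at the shorter list

-- ===== PRECONDITION & SPEC =====
def Spec_modify_order (A : List Int) (out : List Int) : Prop := out = modify_order_alt A
instance (A : List Int) (out : List Int) : Decidable (Spec_modify_order A out) := by unfold Spec_modify_order; infer_instance

-- ===== CLAIM (what is proved, stated in full; the proofs are below) =====
def Claim_equal_modify_order : Prop := ∀ (A : List Int), Dom_modify_order A → Spec_modify_order A (modify_order A)

-- ===== LEMMAS AND PROOFS =====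

theorem pvSufmin_length (xs : List Int) : (pvSufmin xs).length = xs.length := by
  induction xs with
  | nil => simp [pvSufmin]
  | cons x rest ih =>
    simp only [pvSufmin]
    cases hr : pvSufmin rest with
    | nil => simp_all
    | cons s0 st => simp_all

-- snoc characterisation of the suffix-minima list
theorem pvSufmin_snoc (xs : List Int) (c : Int) :
    pvSufmin (xs ++ [c]) = (pvSufmin xs).map (fun s => min s c) ++ [c] := by
  induction xs with
  | nil => simp [pvSufmin]
  | cons x rest ih =>
    simp only [List.cons_append, pvSufmin, ih]
    cases hr : pvSufmin rest with
    | nil => simp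
    | cons s0 st => simp [min_assoc]

theorem zipWith_longer_left (f : Int → Int → Int) :
    ∀ (l₁ l₂ l₃ : List Int), l₂.length ≤ l₁.length →
      List.zipWith f (l₁ ++ l₃) l₂ = List.zipWith f l₁ l₂ := by
  intro l₁
  induction l₁ with
  | nil =>
    intro l₂ l₃ h
    have : l₂ = [] := by cases l₂ <;> simp_all
    simp [this]
  | cons a t ih =>
    intro l₂ l₃ h
    cases l₂ with
    | nil => simp
    | cons b t₂ =>
      simp only [List.cons_append, List.zipWith]
      rw [ih t₂ l₃ (by simpa using h)]

-- B satisfies A's recurrence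
theorem alt_snoc2 (xs : List Int) (y c : Int) :
    modify_order_alt (xs ++ [y, c]) = modify_order_alt (xs ++ [min y c]) ++ [max y c] := by
  cases xs with
  | nil =>
    simp [modify_order_alt, pvSufmin]
  | cons x rest =>
    have h2 : pvSufmin ((x :: rest) ++ [y, c])
        = (pvSufmin (x :: rest)).map (fun s => min s (min y c)) ++ [min y c, c] := by
      have e : (x :: rest) ++ [y, c] = ((x :: rest) ++ [y]) ++ [c] := by simp
      rw [e, pvSufmin_snoc, pvSufmin_snoc, List.map_append, List.map_map]
      simp [Function.comp_def, min_assoc]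
    have h1 : pvSufmin ((x :: rest) ++ [min y c])
        = (pvSufmin (x :: rest)).map (fun s => min s (min y c)) ++ [min y c] :=
      pvSufmin_snoc _ _
    unfold modify_order_alt
    rw [h2, h1]
    cases hS : pvSufmin (x :: rest) with
    | nil =>
      exfalso
      have := pvSufmin_length (x :: rest)
      simp [hS] at this
    | cons s0 st =>
      have hlen : st.length = rest.length := by
        have := pvSufmin_length (x :: rest)
        rw [hS] at this; simpa using this
      rw [if_neg (by simp), if_neg (by simp)]
      simp only [List.map_cons, List.cons_append]
      congr 1
      -- tails: zipWith max over the appropriate chunks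
      have key : ∀ (as bs : List Int), as.length = bs.length + 1 →
          List.zipWith max (as ++ [y, c]) (bs ++ [min y c, c])
            = List.zipWith max (as ++ [min y c]) (bs ++ [min y c]) ++ [max y c] := by
        intro as bs hab
        rw [show bs ++ [min y c, c] = (bs ++ [min y c]) ++ [c] from by simp,
            List.zipWith_append (by simp [hab]),
            zipWith_longer_left max (as) (bs ++ [min y c]) [min y c] (by simp [hab])]
        simp [List.zipWith]
      simpa using key (x :: rest) (st.map (fun s => min s (min y c))) (by simp [hlen])

-- unfolding A's port on a list ending in [y, c]
theorem modify_order_snoc2 (xs : List Int) (y c : Int) :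
    modify_order (xs ++ [y, c])
      = modify_order (xs ++ [min c y]) ++ [max c y] := by
  rw [modify_order]
  have hrev : (xs ++ [y, c]).reverse = c :: y :: xs.reverse := by simp
  rw [if_neg (by simp)]
  split
  next tail hip Brev heq =>
    rw [hrev] at heq
    injection heq with h1 h2
    injection h2 with h2 h3
    subst h1; subst h2; subst h3
    by_cases hlt : c < y
    · rw [if_pos hlt]
      simp [min_eq_left hlt.le, max_eq_right hlt.le]
    · rw [if_neg hlt]
      rw [not_lt] at hlt
      simp [min_eq_right hlt, max_eq_left hlt]
  next h =>
    exact absurd hrev (h c y xs.reverse)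

theorem main_aux : ∀ (n : Nat) (A : List Int), A.length ≤ n → modify_order A = modify_order_alt A := by
  intro n
  induction n with
  | zero =>
    intro A hA
    have : A = [] := by cases A <;> simp_all
    subst this
    simp [modify_order, modify_order_alt]
  | succ n ih =>
    intro A hA
    by_cases hlen : A.length < 2
    · rw [modify_order, modify_order_alt, if_pos hlen, if_pos hlen]
    · -- A ends in two elements
      obtain ⟨xs, y, c, rfl⟩ : ∃ xs y c, A = xs ++ [y, c] := by
        rcases A.eq_nil_or_concat with rfl | ⟨B1, c, rfl⟩
        · simp at hlen
        · rcases B1.eq_nil_or_concat with rfl | ⟨xs, y, rfl⟩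
          · simp at hlen
          · exact ⟨xs, y, c, by simp⟩
      rw [modify_order_snoc2]
      have hlen' : (xs ++ [min c y]).length ≤ n := by
        simp at hA ⊢; omega
      rw [ih _ hlen']
      rw [show min c y = min y c from min_comm c y, show max c y = max y c from max_comm c y]
      exact (alt_snoc2 xs y c).symm

-- ===== VERDICT (by name: the statement is the Claim_ definition above) =====
theorem modify_order_spec : Claim_equal_modify_order := by
  intro A _
  unfold Spec_modify_order
  exact main_aux A.length A le_rfl
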